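-- pv_equiv track=rewrite | github.com/achimdehnert/platform | tools/print_agent/print_agent.py | parse_tree_block
-- ===== SOURCE A (Python) =====
-- def parse_tree_block(block: str) -> str:
--     """Wandelt eingerückten Dateibaum-Text (```tree) in HTML .file-tree um."""
--     lines = [l.rstrip() for l in block.strip().splitlines()]
--     if not lines:
--         return ""
--
--     def split_note(text: str):
--         if " -- " in text:
--             n, c = text.split(" -- ", 1)
--             return n.strip(), c.strip()
--         return text.strip(), ""
--
--     def indent_of(line: str) -> int:
--         return len(line) - len(line.lstrip())
--
--     root_name, root_note = split_note(lines[0])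
--     root_note_html = f' <span class="ft-note">— {root_note}</span>' if root_note else ""
--
--     items: list[tuple[int, str, str]] = []
--     for line in lines[1:]:
--         if not line.strip():
--             continue
--         items.append((indent_of(line), *split_note(line)))
--
--     if not items:
--         return f'<div class="file-tree"><span class="ft-root">{root_name}</span>{root_note_html}</div>'
--
--     base = items[0][0]
--
--     def build(pos: int, min_indent: int):
--         html = "<ul>\n"
--         i = pos
--         while i < len(items):
--             ind, name, note = items[i]
--             if ind < min_indent:
--                 break
--             is_dir = name.endswith("/")
--             note_html = f' <span class="ft-note">— {note}</span>' if note else ""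
--             tag = f'<span class="ft-dir">{name}</span>' if is_dir else name
--             if i + 1 < len(items) and items[i + 1][0] > ind:
--                 child_html, i = build(i + 1, ind + 1)
--                 html += f"  <li>{tag}{note_html}\n{child_html}  </li>\n"
--             else:
--                 html += f"  <li>{tag}{note_html}</li>\n"
--                 i += 1
--         html += "</ul>\n"
--         return html, i
--
--     ul_html, _ = build(0, base)
--     return f'<div class="file-tree">\n<span class="ft-root">{root_name}</span>{root_note_html}\n{ul_html}</div>'
-- ===== SOURCE B (Python) =====
-- def parse_tree_block(block: str) -> str:
--     """Convert indented file-tree text (```tree) into nested .file-tree HTML.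
--
--     Single left-to-right pass over the items with an explicit stack of open
--     indentation thresholds instead of recursion.
--     """
--     lines = [l.rstrip() for l in block.strip().splitlines()]
--     if not lines:
--         return ""
--
--     def split_note(text: str):
--         if " -- " in text:
--             n, c = text.split(" -- ", 1)
--             return n.strip(), c.strip()
--         return text.strip(), ""
--
--     def indent_of(line: str) -> int:
--         return len(line) - len(line.lstrip())
--
--     root_name, root_note = split_note(lines[0])
--     root_note_html = f' <span class="ft-note">— {root_note}</span>' if root_note else ""
--
--     items = []
--     for line in lines[1:]:
--         if not line.strip():
--             continue
--         items.append((indent_of(line), *split_note(line)))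
--
--     if not items:
--         return f'<div class="file-tree"><span class="ft-root">{root_name}</span>{root_note_html}</div>'
--
--     parts = ["<ul>\n"]
--     stack = [items[0][0]]  # open <ul> contexts, each with its min-indent threshold
--     for idx, (ind, name, note) in enumerate(items):
--         while len(stack) > 1 and ind < stack[-1]:
--             stack.pop()
--             parts.append("</ul>\n  </li>\n")
--         if ind < stack[-1]:
--             break  # item sits outside the whole tree: nothing below it belongs
--         note_html = f' <span class="ft-note">— {note}</span>' if note else ""
--         tag = f'<span class="ft-dir">{name}</span>' if name.endswith("/") else name
--         if idx + 1 < len(items) and items[idx + 1][0] > ind: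
--             parts.append(f"  <li>{tag}{note_html}\n<ul>\n")
--             stack.append(ind + 1)
--         else:
--             parts.append(f"  <li>{tag}{note_html}</li>\n")
--     while len(stack) > 1:
--         stack.pop()
--         parts.append("</ul>\n  </li>\n")
--     parts.append("</ul>\n")
--     ul_html = "".join(parts)
--     return f'<div class="file-tree">\n<span class="ft-root">{root_name}</span>{root_note_html}\n{ul_html}</div>'
-- ===== Notes on version B (the rewrite author's own statement) =====
-- stated objective: alternative
-- what changed: Replaced A's recursive build() descent over the items with a single left-to-right pass that maintains an explicit stack of open <ul> indentation thresholds, pushing a context when the next item is deeper and popping closing fragments when the indent drops.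
import Mathlib
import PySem

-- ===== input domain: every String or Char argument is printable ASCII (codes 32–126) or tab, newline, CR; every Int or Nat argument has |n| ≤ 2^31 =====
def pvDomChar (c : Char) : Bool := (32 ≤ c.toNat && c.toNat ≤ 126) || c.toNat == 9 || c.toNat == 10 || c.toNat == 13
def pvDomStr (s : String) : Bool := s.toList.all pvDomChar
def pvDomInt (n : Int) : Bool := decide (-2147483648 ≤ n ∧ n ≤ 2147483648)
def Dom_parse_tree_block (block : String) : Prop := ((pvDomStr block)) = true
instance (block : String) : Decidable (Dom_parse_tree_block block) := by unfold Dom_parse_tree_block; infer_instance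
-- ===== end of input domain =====

-- B replaces A's recursive build() with one left-to-right pass over the items
-- keeping an explicit stack of open <ul> indent thresholds (objective: alternative).

-- shared parsing helpers (identical in both Pythons): split_note, indent_of, the items list,
-- and the two inline f-string fragments for the note span and the dir/file tag
abbrev PvItem := Int × List Char × List Char

def pvSplitNote (text : List Char) : List Char × List Char :=
  if PySem.Chars.isIn " -- ".toList text then
    match PySem.Chars.splitOnMax text " -- ".toList 1 with
    | n :: c :: _ => (PySem.Chars.strip n, PySem.Chars.strip c)
    | _ => (PySem.Chars.strip text, [])   -- unreachable: split on a present separator has ≥ 2 pieces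
  else (PySem.Chars.strip text, [])

def pvIndentOf (line : List Char) : Int :=
  PySem.Chars.len line - PySem.Chars.len (PySem.Chars.lstrip line)

def pvItems (rest : List (List Char)) : List PvItem :=
  rest.foldl (fun acc line =>
    if PySem.Chars.strip line = [] then acc
    else acc ++ [(pvIndentOf line, pvSplitNote line)]) []

def pvNoteHtml (note : List Char) : List Char :=
  if note = [] then [] else " <span class=\"ft-note\">— ".toList ++ note ++ "</span>".toList

def pvTag (name : List Char) : List Char :=
  if PySem.Chars.endswith name "/".toList then
    "<span class=\"ft-dir\">".toList ++ name ++ "</span>".toList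
  else name

def pvLi (name note : List Char) : List Char :=
  "  <li>".toList ++ pvTag name ++ pvNoteHtml note

-- "i + 1 < len(items) and items[i + 1][0] > ind"
def pvHasChild (ind : Int) (rest : List PvItem) : Bool :=
  match rest.head? with
  | some nxt => decide (ind < nxt.1)
  | none => false

-- ===== PORT A =====
-- A's recursive build(pos, min_indent): the while body as fuelled recursion over the
-- suffix of items; returns (html of the loop body, leftover suffix = returned index)
def pvBuildA : Nat → List PvItem → Int → List Char × List PvItem
  | 0, l, _ => ([], l)
  | _ + 1, [], _ => ([], [])
  | f + 1, it :: rest, m =>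
    if it.1 < m then ([], it :: rest)
    else if pvHasChild it.1 rest then
      (pvLi it.2.1 it.2.2 ++ "\n".toList
        ++ ("<ul>\n".toList ++ (pvBuildA f rest (it.1 + 1)).1 ++ "</ul>\n".toList)
        ++ "  </li>\n".toList ++ (pvBuildA f (pvBuildA f rest (it.1 + 1)).2 m).1,
       (pvBuildA f (pvBuildA f rest (it.1 + 1)).2 m).2)
    else
      (pvLi it.2.1 it.2.2 ++ "</li>\n".toList ++ (pvBuildA f rest m).1,
       (pvBuildA f rest m).2)

def parse_tree_block (block : String) : String :=
  match (PySem.Chars.splitlines (PySem.Chars.strip block.toList)).map PySem.Chars.rstrip with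
  | [] => ""
  | first :: rest =>
    let rootName := (pvSplitNote first).1
    let rootNoteHtml := pvNoteHtml (pvSplitNote first).2
    match pvItems rest with
    | [] => String.mk ("<div class=\"file-tree\"><span class=\"ft-root\">".toList
              ++ rootName ++ "</span>".toList ++ rootNoteHtml ++ "</div>".toList)
    | it :: items' =>
      let items := it :: items'
      let ulHtml := "<ul>\n".toList ++ (pvBuildA (items.length + 1) items it.1).1 ++ "</ul>\n".toList
      String.mk ("<div class=\"file-tree\">\n<span class=\"ft-root\">".toList
        ++ rootName ++ "</span>".toList ++ rootNoteHtml ++ "\n".toList ++ ulHtml ++ "</div>".toList)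

-- ===== PORT B =====
-- B's explicit stack: pop closings while the indent drops below the top threshold
def pvPopCloses : List Int → Int → List Int × List Char
  | t :: t2 :: s, ind =>
    if ind < t then
      ((pvPopCloses (t2 :: s) ind).1,
       "</ul>\n  </li>\n".toList ++ (pvPopCloses (t2 :: s) ind).2)
    else (t :: t2 :: s, [])
  | st, _ => (st, [])

-- the final closing loop: pop every open context, then close the outer <ul>
def pvCloseAll : List Int → List Char
  | _ :: t2 :: s => "</ul>\n  </li>\n".toList ++ pvCloseAll (t2 :: s)
  | _ => "</ul>\n".toList

def pvBreak (ind : Int) (st : List Int) : Bool :=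
  match st.head? with
  | some t => decide (ind < t)
  | none => false

def pvLoopB : List PvItem → List Int → List Char
  | [], st => pvCloseAll st
  | it :: rest, st =>
    (pvPopCloses st it.1).2 ++
    (if pvBreak it.1 (pvPopCloses st it.1).1 then pvCloseAll (pvPopCloses st it.1).1
     else if pvHasChild it.1 rest then
       pvLi it.2.1 it.2.2 ++ "\n<ul>\n".toList ++ pvLoopB rest ((it.1 + 1) :: (pvPopCloses st it.1).1)
     else
       pvLi it.2.1 it.2.2 ++ "</li>\n".toList ++ pvLoopB rest (pvPopCloses st it.1).1)

def parse_tree_block_alt (block : String) : String :=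
  match (PySem.Chars.splitlines (PySem.Chars.strip block.toList)).map PySem.Chars.rstrip with
  | [] => ""
  | first :: rest =>
    let rootName := (pvSplitNote first).1
    let rootNoteHtml := pvNoteHtml (pvSplitNote first).2
    match pvItems rest with
    | [] => String.mk ("<div class=\"file-tree\"><span class=\"ft-root\">".toList
              ++ rootName ++ "</span>".toList ++ rootNoteHtml ++ "</div>".toList)
    | it :: items' =>
      let ulHtml := "<ul>\n".toList ++ pvLoopB (it :: items') [it.1]
      String.mk ("<div class=\"file-tree\">\n<span class=\"ft-root\">".toList
        ++ rootName ++ "</span>".toList ++ rootNoteHtml ++ "\n".toList ++ ulHtml ++ "</div>".toList)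

-- ===== PRECONDITION & SPEC =====
def Spec_parse_tree_block (block : String) (out : String) : Prop := out = parse_tree_block_alt block
instance (block : String) (out : String) : Decidable (Spec_parse_tree_block block out) := by unfold Spec_parse_tree_block; infer_instance

-- ===== CLAIM (what is proved, stated in full; the proofs are below) =====
def Claim_equal_parse_tree_block : Prop := ∀ (block : String), Dom_parse_tree_block block → Spec_parse_tree_block block (parse_tree_block block)

-- ===== LEMMAS AND PROOFS =====

-- what B still owes after A's build returns: close the enclosing contexts
def pvK : List Int → List PvItem → List Char
  | [], _ => "</ul>\n".toList
  | t :: s, leftover => "</ul>\n  </li>\n".toList ++ pvLoopB leftover (t :: s)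

lemma pvLit1 : ("\n<ul>\n".toList : List Char) = "\n".toList ++ "<ul>\n".toList := by decide

lemma pvLit2 : ("</ul>\n  </li>\n".toList : List Char) = "</ul>\n".toList ++ "  </li>\n".toList := by
  decide

lemma pvBuildA_len : ∀ (f : Nat) (l : List PvItem) (m : Int),
    (pvBuildA f l m).2.length ≤ l.length := by
  intro f
  induction f with
  | zero => intro l m; simp [pvBuildA]
  | succ f ih =>
    intro l m
    cases l with
    | nil => simp [pvBuildA]
    | cons it rest =>
      by_cases hm : it.1 < m
      · simp [pvBuildA, hm]
      · by_cases hc : pvHasChild it.1 rest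
        · simp only [pvBuildA, if_neg hm, if_pos hc]
          calc (pvBuildA f (pvBuildA f rest (it.1 + 1)).2 m).2.length
              ≤ (pvBuildA f rest (it.1 + 1)).2.length := ih _ _
            _ ≤ rest.length := ih _ _
            _ ≤ (it :: rest).length := by simp
        · simp only [pvBuildA, if_neg hm, if_neg hc]
          calc (pvBuildA f rest m).2.length ≤ rest.length := ih _ _
            _ ≤ (it :: rest).length := by simp

lemma pvPop_ge (ind m : Int) (S : List Int) (h : ¬ ind < m) :
    pvPopCloses (m :: S) ind = (m :: S, []) := by
  cases S <;> simp [pvPopCloses, h]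

lemma pvPopStep (it : PvItem) (rest : List PvItem) (m t : Int) (s : List Int)
    (h : it.1 < m) :
    pvLoopB (it :: rest) (m :: t :: s)
      = "</ul>\n  </li>\n".toList ++ pvLoopB (it :: rest) (t :: s) := by
  simp [pvLoopB, pvPopCloses, h, List.append_assoc]

lemma pv_main : ∀ (f : Nat) (l : List PvItem) (m : Int) (S : List Int), l.length < f →
    pvLoopB l (m :: S) = (pvBuildA f l m).1 ++ pvK S (pvBuildA f l m).2 := by
  intro f
  induction f with
  | zero => intro l m S h; omega
  | succ f ih =>
    intro l m S h
    cases l with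
    | nil =>
      cases S with
      | nil => simp [pvLoopB, pvCloseAll, pvBuildA, pvK]
      | cons t s => simp [pvLoopB, pvCloseAll, pvBuildA, pvK]
    | cons it rest =>
      by_cases hm : it.1 < m
      · cases S with
        | nil =>
          simp [pvLoopB, pvPopCloses, pvBreak, hm, pvCloseAll, pvBuildA, pvK]
        | cons t s =>
          rw [pvPopStep it rest m t s hm]
          simp [pvBuildA, hm, pvK]
      · have hrest : rest.length < f := by simp at h; omega
        by_cases hc : pvHasChild it.1 rest
        · have h2 : (pvBuildA f rest (it.1 + 1)).2.length < f :=
            lt_of_le_of_lt (pvBuildA_len f rest (it.1 + 1)) hrest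
          simp only [pvLoopB, pvPop_ge it.1 m S hm, pvBreak, List.head?_cons,
            decide_eq_true_eq, if_neg hm, if_pos hc, List.nil_append]
          rw [ih rest (it.1 + 1) (m :: S) hrest]
          simp only [pvK]
          rw [ih (pvBuildA f rest (it.1 + 1)).2 m S h2]
          simp only [pvBuildA, if_neg hm, if_pos hc]
          rw [pvLit1, pvLit2]
          cases S <;> simp [pvK, List.append_assoc]
        · simp only [pvLoopB, pvPop_ge it.1 m S hm, pvBreak, List.head?_cons,
            decide_eq_true_eq, if_neg hm, if_neg hc, List.nil_append]
          rw [ih rest m S hrest]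
          simp only [pvBuildA, if_neg hm, if_neg hc]
          simp [List.append_assoc]

-- ===== VERDICT (by name: the statement is the Claim_ definition above) =====
theorem parse_tree_block_spec : Claim_equal_parse_tree_block := by
  intro block _
  show parse_tree_block block = parse_tree_block_alt block
  unfold parse_tree_block parse_tree_block_alt
  cases h : (PySem.Chars.splitlines (PySem.Chars.strip block.toList)).map PySem.Chars.rstrip with
  | nil => rfl
  | cons first rest =>
    cases h2 : pvItems rest with
    | nil => simp [h2]
    | cons it items' =>
      have hmain := pv_main ((it :: items').length + 1) (it :: items') it.1 [] (by omega)
      simp only [pvK] at hmain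
      simp only [h2, List.length_cons] at *
      simp [hmain, List.append_assoc]
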